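-- pv_equiv track=rewrite | github.com/AntaoA/projet-blast | blast.py | find_double_hits
-- ===== SOURCE A (Python) =====
-- def find_double_hits(dico_mots, database, w, A):
--     doubles_hits = set()
--
--     for seq_id, seq in enumerate(database):
--         last_hit = {}
--         for pos_in_seq in range(len(seq) - w + 1):
--             mot = seq[pos_in_seq:pos_in_seq + w]
--             if mot in dico_mots:
--                 for pos_in_querry in dico_mots[mot]:
--                     diagonal = pos_in_querry - pos_in_seq
--                     if diagonal in last_hit:
--                         if w <= pos_in_querry - last_hit[diagonal] <= A:
--                             doubles_hits.add((seq_id, pos_in_querry, pos_in_seq)) # On ajoute que le second hits, que l'on va étendre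
--                     last_hit[diagonal] = pos_in_querry
--     return doubles_hits
-- ===== SOURCE B (Python) =====
-- def find_double_hits(dico_mots, database, w, A):
--     doubles_hits = set()
--     for seq_id, seq in enumerate(database):
--         hits = [(q, s) for s in range(len(seq) - w + 1)
--                        for q in dico_mots.get(seq[s:s + w], [])]
--         by_diag = {}
--         for i, (q, s) in enumerate(hits):
--             by_diag.setdefault(q - s, []).append((i, q))
--         good = set()
--         for chain in by_diag.values():
--             for (_, prev_q), (i, q) in zip(chain, chain[1:]):
--                 if w <= q - prev_q <= A:
--                     good.add(i)
--         for i, (q, s) in enumerate(hits):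
--             if i in good:
--                 doubles_hits.add((seq_id, q, s))
--     return doubles_hits
-- ===== Notes on version B (the rewrite author's own statement) =====
-- stated objective: alternative
-- what changed: A's online per-diagonal last-hit dictionary is replaced by an offline decomposition: build the flat hit list, group it into per-diagonal chains in a dict, scan each chain's consecutive pairs to mark good second-hit indices, then collect the marked hits in encounter order.
import Mathlib
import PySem

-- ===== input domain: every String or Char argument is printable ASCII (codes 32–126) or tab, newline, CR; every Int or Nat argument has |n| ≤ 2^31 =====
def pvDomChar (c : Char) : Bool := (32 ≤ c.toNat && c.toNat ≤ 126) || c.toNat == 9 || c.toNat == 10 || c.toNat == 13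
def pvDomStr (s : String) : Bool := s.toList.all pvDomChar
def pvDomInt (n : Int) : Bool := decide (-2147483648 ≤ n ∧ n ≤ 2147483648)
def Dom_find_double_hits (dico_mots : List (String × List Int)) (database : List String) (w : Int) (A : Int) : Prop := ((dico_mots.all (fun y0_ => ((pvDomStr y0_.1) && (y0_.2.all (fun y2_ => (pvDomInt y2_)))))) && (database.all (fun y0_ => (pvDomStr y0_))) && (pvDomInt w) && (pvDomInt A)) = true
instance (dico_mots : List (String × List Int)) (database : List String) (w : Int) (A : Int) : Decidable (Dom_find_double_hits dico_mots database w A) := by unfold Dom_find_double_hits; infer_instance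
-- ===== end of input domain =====

-- B replaces A's online per-diagonal last-hit bookkeeping by an explicit grouped diagonal index
-- (flat hit list, dict of per-diagonal chains, consecutive-pair scan, in-order collection);
-- objective: alternative decomposition, same result (a Python set), not faster.

-- ===== PORT A =====
def find_double_hits (dico_mots : List (String × List Int)) (database : List String) (w : Int) (A : Int) : List (Int × Int × Int) :=
  (PySem.List.enumerate database).foldl (fun doubles_hits p =>
    let seq_id := p.1
    let seq := p.2
    let st := (PySem.List.pyRange 0 (PySem.Str.len seq - w + 1) 1).foldl (fun st pos_in_seq =>
      let mot := PySem.Str.slice seq (some pos_in_seq) (some (pos_in_seq + w))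
      match (PySem.Dict.mk dico_mots).get? mot with
      | some qs =>
          qs.foldl (fun st pos_in_querry =>
            let diagonal := pos_in_querry - pos_in_seq
            let dh :=
              match st.1.get? diagonal with
              | some last =>
                  if w ≤ pos_in_querry - last ∧ pos_in_querry - last ≤ A then
                    PySem.Set.add st.2 (seq_id, pos_in_querry, pos_in_seq)
                  else st.2
              | none => st.2
            (st.1.insert diagonal pos_in_querry, dh)) st
      | none => st) ((PySem.Dict.empty : PySem.Dict Int Int), doubles_hits)
    st.2) PySem.Set.empty

-- ===== PORT B =====
def find_double_hits_alt (dico_mots : List (String × List Int)) (database : List String) (w : Int) (A : Int) : List (Int × Int × Int) :=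
  (PySem.List.enumerate database).foldl (fun doubles_hits p =>
    let seq_id := p.1
    let seq := p.2
    let hits : List (Int × Int) :=
      (PySem.List.pyRange 0 (PySem.Str.len seq - w + 1) 1).flatMap (fun s =>
        ((PySem.Dict.mk dico_mots).getD (PySem.Str.slice seq (some s) (some (s + w))) []).map
          (fun q => (q, s)))
    let by_diag : PySem.Dict Int (List (Int × Int)) :=
      (PySem.List.enumerate hits).foldl (fun d p =>
        d.modify (p.2.1 - p.2.2) [] (· ++ [(p.1, p.2.1)])) PySem.Dict.empty
    let good : PySem.Set Int :=
      by_diag.values.foldl (fun g chain =>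
        (chain.zip (PySem.List.slice chain (some 1) none)).foldl (fun g pr =>
          if w ≤ pr.2.2 - pr.1.2 ∧ pr.2.2 - pr.1.2 ≤ A then PySem.Set.add g pr.2.1 else g) g)
        PySem.Set.empty
    (PySem.List.enumerate hits).foldl (fun dh p =>
      if PySem.Set.contains good p.1 then PySem.Set.add dh (seq_id, p.2.1, p.2.2) else dh)
      doubles_hits) PySem.Set.empty

-- ===== PRECONDITION & SPEC =====
def Spec_find_double_hits (dico_mots : List (String × List Int)) (database : List String) (w : Int) (A : Int) (out : List (Int × Int × Int)) : Prop := out = find_double_hits_alt dico_mots database w A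
instance (dico_mots : List (String × List Int)) (database : List String) (w : Int) (A : Int) (out : List (Int × Int × Int)) : Decidable (Spec_find_double_hits dico_mots database w A out) := by unfold Spec_find_double_hits; infer_instance

-- ===== CLAIM (what is proved, stated in full; the proofs are below) =====
def Claim_equal_find_double_hits : Prop := ∀ (dico_mots : List (String × List Int)) (database : List String) (w : Int) (A : Int), Dom_find_double_hits dico_mots database w A → Spec_find_double_hits dico_mots database w A (find_double_hits dico_mots database w A)

-- ===== LEMMAS AND PROOFS =====

-- diagonal of a hit (q, s)
def pvDg (p : Int × Int) : Int := p.1 - p.2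

-- query position of the last hit on diagonal c among the hits l (Python: last_hit[c])
def pvLastQ (l : List (Int × Int)) (c : Int) : Option Int :=
  ((l.filter (fun p => pvDg p == c)).map (·.1)).getLast?

-- is x a valid second hit given the already-seen hits l?
def pvHitOK (w A : Int) (l : List (Int × Int)) (x : Int × Int) : Bool :=
  match pvLastQ l (pvDg x) with
  | some last => decide (w ≤ x.1 - last ∧ x.1 - last ≤ A)
  | none => false

-- reference emitter: walk the hit list left to right, emitting each valid second hit
def pvEmit (w A sid : Int) : List (Int × Int) → List (Int × Int) → List (Int × Int × Int) → List (Int × Int × Int)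
  | _, [], acc => acc
  | pre, x :: rest, acc =>
      pvEmit w A sid (pre ++ [x]) rest
        (if pvHitOK w A pre x then PySem.Set.add acc (sid, x.1, x.2) else acc)

-- A's inner step over a single hit (q, s)
def pvStepA (w A sid : Int) (st : PySem.Dict Int Int × List (Int × Int × Int)) (x : Int × Int) :
    PySem.Dict Int Int × List (Int × Int × Int) :=
  (st.1.insert (x.1 - x.2) x.1,
   match st.1.get? (x.1 - x.2) with
   | some last =>
       if w ≤ x.1 - last ∧ x.1 - last ≤ A then PySem.Set.add st.2 (sid, x.1, x.2) else st.2
   | none => st.2)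

-- B's grouped diagonal index / chains / good-index set, as in the port
def pvBD (h : List (Int × Int)) : PySem.Dict Int (List (Int × Int)) :=
  (PySem.List.enumerate h).foldl (fun d p => d.modify (p.2.1 - p.2.2) [] (· ++ [(p.1, p.2.1)])) PySem.Dict.empty

def pvChain (h : List (Int × Int)) (c : Int) : List (Int × Int) := (pvBD h).getD c []

def pvGood (w A : Int) (h : List (Int × Int)) : PySem.Set Int :=
  (pvBD h).values.foldl (fun g chain =>
    (chain.zip (PySem.List.slice chain (some 1) none)).foldl (fun g pr =>
      if w ≤ pr.2.2 - pr.1.2 ∧ pr.2.2 - pr.1.2 ≤ A then PySem.Set.add g pr.2.1 else g) g)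
    PySem.Set.empty

def pvGoodSpec (w A : Int) (h : List (Int × Int)) (i : Int) : Prop :=
  ∃ (k : Nat) (hk : k < h.length), i = (k : Int) ∧ pvHitOK w A (h.take k) h[k] = true

theorem pvFoldlFlatMap {α β γ : Type} (l : List α) (f : α → List β) (g : γ → β → γ) (init : γ) :
    (l.flatMap f).foldl g init = l.foldl (fun st a => (f a).foldl g st) init := by
  induction l generalizing init with
  | nil => rfl
  | cons a l ih => simp [List.flatMap_cons, List.foldl_append, ih]

theorem pvLastQ_nil (c : Int) : pvLastQ [] c = none := rfl

theorem pvLastQ_snoc (h : List (Int × Int)) (x : Int × Int) (c : Int) :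
    pvLastQ (h ++ [x]) c = if pvDg x == c then some x.1 else pvLastQ h c := by
  unfold pvLastQ
  rw [List.filter_append]
  by_cases hc : pvDg x == c
  · simp [hc]
  · simp [hc]

theorem pvScanA (w A sid : Int) (suf : List (Int × Int)) :
    ∀ (pre : List (Int × Int)) (lh : PySem.Dict Int Int) (acc : List (Int × Int × Int)),
      (∀ c, lh.get? c = pvLastQ pre c) →
      (suf.foldl (pvStepA w A sid) (lh, acc)).2 = pvEmit w A sid pre suf acc := by
  induction suf with
  | nil => intro pre lh acc _; rfl
  | cons x rest ih =>
      intro pre lh acc hinv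
      have hacc : (pvStepA w A sid (lh, acc) x).2
          = (if pvHitOK w A pre x then PySem.Set.add acc (sid, x.1, x.2) else acc) := by
        show (match lh.get? (x.1 - x.2) with
              | some last =>
                  if w ≤ x.1 - last ∧ x.1 - last ≤ A then PySem.Set.add acc (sid, x.1, x.2) else acc
              | none => acc) = _
        rw [hinv (x.1 - x.2)]
        unfold pvHitOK pvDg
        cases hq : pvLastQ pre (x.1 - x.2) <;> simp [hq]
      have hinv' : ∀ c, ((pvStepA w A sid (lh, acc) x).1).get? c = pvLastQ (pre ++ [x]) c := by
        intro c
        show ((lh.insert (x.1 - x.2) x.1).get? c) = _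
        rw [PySem.Dict.get?_insert, pvLastQ_snoc]
        by_cases hc : c = x.1 - x.2
        · simp [hc, pvDg]
        · have hnb : (pvDg x == c) = false := by
            simp only [pvDg, beq_eq_false_iff_ne, ne_eq]
            omega
          simp [hc, hnb, hinv c]
      rw [List.foldl_cons]
      have hpair : pvStepA w A sid (lh, acc) x
          = ((pvStepA w A sid (lh, acc) x).1,
             if pvHitOK w A pre x then PySem.Set.add acc (sid, x.1, x.2) else acc) := by
        rw [← hacc]
      rw [hpair]
      exact ih (pre ++ [x]) _ _ hinv' 

theorem pvChain_eq (h : List (Int × Int)) (c : Int) :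
    pvChain h c
      = ((PySem.List.enumerate h).filter (fun p => (p.2.1 - p.2.2) == c)).map (fun p => (p.1, p.2.1)) := by
  unfold pvChain pvBD
  rw [show (PySem.List.enumerate h).foldl
        (fun d p => d.modify (p.2.1 - p.2.2) [] (· ++ [(p.1, p.2.1)]))
        (PySem.Dict.empty : PySem.Dict Int (List (Int × Int)))
      = ((PySem.List.enumerate h).map (fun p => ((p.2.1 - p.2.2 : Int), ((p.1, p.2.1) : Int × Int)))).foldl
        (fun d q => d.modify q.1 [] (· ++ [q.2])) PySem.Dict.empty from by rw [List.foldl_map]]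
  rw [PySem.Dict.getD_foldl_modify_append]
  rw [List.filter_map, List.map_map]
  rw [show (PySem.Dict.empty : PySem.Dict Int (List (Int × Int))).getD c [] = [] from rfl]
  rfl

theorem pvBD_nodup (h : List (Int × Int)) : (pvBD h).keys.Nodup := by
  unfold pvBD
  exact PySem.Dict.nodup_keys_foldl_modify_key _ _ _ _ _ (by simp [PySem.Dict.keys_empty])

theorem pvChain_ne_nil_mem_keys (h : List (Int × Int)) (c : Int) (hne : pvChain h c ≠ []) :
    c ∈ (pvBD h).keys := by
  have hkeys : (pvBD h).keys
      = PySem.Set.update (PySem.Dict.empty : PySem.Dict Int (List (Int × Int))).keys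
          ((PySem.List.enumerate h).map (fun p => p.2.1 - p.2.2)) := by
    unfold pvBD
    exact PySem.Dict.keys_foldl_modify_key _ _ _ _ _
  rw [pvChain_eq] at hne
  rcases List.exists_mem_of_ne_nil _ hne with ⟨e, he⟩
  rcases List.mem_map.mp he with ⟨p, hp, _⟩
  rcases List.mem_filter.mp hp with ⟨hpm, hpc⟩
  rw [hkeys]
  rw [show (PySem.Dict.empty : PySem.Dict Int (List (Int × Int))).keys = [] from rfl]
  rw [PySem.Set.update_nil_left, PySem.Set.mem_ofList]
  exact List.mem_map.mpr ⟨p, hpm, by simpa using hpc⟩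

theorem pvMemFoldlIf {β : Type} (l : List β) (P : β → Prop) [DecidablePred P] (f : β → Int)
    (g0 : PySem.Set Int) (i : Int) :
    (i ∈ l.foldl (fun g y => if P y then PySem.Set.add g (f y) else g) g0)
      ↔ i ∈ g0 ∨ ∃ y ∈ l, P y ∧ f y = i := by
  induction l generalizing g0 with
  | nil => simp
  | cons y l ih =>
      simp only [List.foldl_cons]
      by_cases hp : P y
      · rw [if_pos hp, ih]
        simp only [PySem.Set.mem_add, List.mem_cons]
        constructor
        · rintro (⟨h' | h'⟩ | ⟨z, hz, hPz, hfz⟩)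
          · exact Or.inl h'
          · exact Or.inr ⟨y, Or.inl rfl, hp, h'.symm⟩
          · exact Or.inr ⟨z, Or.inr hz, hPz, hfz⟩
        · rintro (h' | ⟨z, hz | hz, hPz, hfz⟩)
          · exact Or.inl (Or.inl h')
          · subst hz; exact Or.inl (Or.inr hfz.symm)
          · exact Or.inr ⟨z, hz, hPz, hfz⟩
      · rw [if_neg hp, ih]
        simp only [List.mem_cons]
        constructor
        · rintro (h' | ⟨z, hz, hPz, hfz⟩)
          · exact Or.inl h'
          · exact Or.inr ⟨z, Or.inr hz, hPz, hfz⟩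
        · rintro (h' | ⟨z, hz | hz, hPz, hfz⟩)
          · exact Or.inl h'
          · subst hz; exact absurd hPz hp
          · exact Or.inr ⟨z, hz, hPz, hfz⟩

theorem pvMemGood (w A : Int) (h : List (Int × Int)) (i : Int) :
    i ∈ pvGood w A h
      ↔ ∃ c, ∃ pr ∈ (pvChain h c).zip (pvChain h c).tail,
          (w ≤ pr.2.2 - pr.1.2 ∧ pr.2.2 - pr.1.2 ≤ A) ∧ pr.2.1 = i := by
  unfold pvGood
  rw [← pvFoldlFlatMap ((pvBD h).values)
        (fun chain => chain.zip (PySem.List.slice chain (some 1) none))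
        (fun g pr => if w ≤ pr.2.2 - pr.1.2 ∧ pr.2.2 - pr.1.2 ≤ A then PySem.Set.add g pr.2.1 else g)
        PySem.Set.empty]
  rw [pvMemFoldlIf]
  simp only [List.mem_flatMap, PySem.List.slice_from_one]
  have hempty : i ∈ (PySem.Set.empty : PySem.Set Int) ↔ False := by
    simp [PySem.Set.empty]
  rw [hempty, false_or]
  constructor
  · rintro ⟨pr, ⟨ch, hch, hpr⟩, hcond, hidx⟩
    have hv := PySem.Dict.values_eq_map_keys (pvBD h) (pvBD_nodup h) ([] : List (Int × Int))
    rw [hv] at hch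
    rcases List.mem_map.mp hch with ⟨c, _, hcc⟩
    refine ⟨c, pr, ?_, hcond, hidx⟩
    have : ch = pvChain h c := hcc.symm
    rw [← this]
    exact hpr
  · rintro ⟨c, pr, hpr, hcond, hidx⟩
    have hne : pvChain h c ≠ [] := by
      intro hnil
      rw [hnil] at hpr
      simp at hpr
    have hck : c ∈ (pvBD h).keys := pvChain_ne_nil_mem_keys h c hne
    have hv := PySem.Dict.values_eq_map_keys (pvBD h) (pvBD_nodup h) ([] : List (Int × Int))
    refine ⟨pr, ⟨pvChain h c, ?_, hpr⟩, hcond, hidx⟩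
    rw [hv]
    exact List.mem_map.mpr ⟨c, hck, rfl⟩

theorem pvChain_snoc (h : List (Int × Int)) (x : Int × Int) (c : Int) :
    pvChain (h ++ [x]) c
      = pvChain h c ++ (if (x.1 - x.2) == c then [(((h.length : Nat) : Int), x.1)] else []) := by
  rw [pvChain_eq, pvChain_eq, PySem.List.enumerate_append, List.filter_append, List.map_append]
  congr 1
  by_cases hc : (x.1 - x.2) == c
  · simp [PySem.List.enumerate_cons, PySem.List.enumerate_nil, hc]
  · simp [PySem.List.enumerate_cons, PySem.List.enumerate_nil, hc]

theorem pvZipTail_snoc (l : List (Int × Int)) (e : Int × Int) :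
    (l ++ [e]).zip (l ++ [e]).tail =
      l.zip l.tail ++ (match l.getLast? with | some a => [(a, e)] | none => []) := by
  induction l with
  | nil => rfl
  | cons a l ih =>
      cases l with
      | nil => rfl
      | cons b m =>
          show ((a, b) :: (((b :: m) ++ [e]).zip (((b :: m) ++ [e]).tail)))
            = ((a, b) :: ((b :: m).zip m)) ++ _
          rw [ih]
          simp [List.getLast?_cons_cons]

theorem pvLastQ_eq_chain (h : List (Int × Int)) (c : Int) :
    pvLastQ h c = ((pvChain h c).getLast?).map (·.2) := by
  unfold pvLastQ
  rw [pvChain_eq]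
  rw [show h.filter (fun p => pvDg p == c)
        = ((PySem.List.enumerate h).filter (fun p => (p.2.1 - p.2.2) == c)).map (·.2) by
    conv_lhs => rw [← PySem.List.map_snd_enumerate h 0]
    rw [List.filter_map]
    rfl]
  simp only [List.map_map, List.getLast?_map, Option.map_map]
  cases ((PySem.List.enumerate h).filter (fun p => (p.2.1 - p.2.2) == c)).getLast? <;> rfl

theorem pvGood_char (w A : Int) (h : List (Int × Int)) (i : Int) :
    i ∈ pvGood w A h ↔ pvGoodSpec w A h i := by
  induction h using List.reverseRecOn with
  | nil =>
      rw [pvMemGood]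
      constructor
      · rintro ⟨c, pr, hpr, -, -⟩
        have hch : pvChain [] c = [] := by rw [pvChain_eq]; rfl
        rw [hch] at hpr; simp at hpr
      · rintro ⟨k, hk, -, -⟩; simp at hk
  | append_singleton h x ih =>
      rw [pvMemGood]
      constructor
      · rintro ⟨c, pr, hpr, hcond, hidx⟩
        rw [pvChain_snoc] at hpr
        by_cases hc : (x.1 - x.2) == c
        · rw [if_pos hc, pvZipTail_snoc] at hpr
          rcases List.mem_append.mp hpr with hold | hnew
          · have hmem : i ∈ pvGood w A h := by
              rw [pvMemGood]; exact ⟨c, pr, hold, hcond, hidx⟩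
            rcases ih.mp hmem with ⟨k, hk, hik, hok⟩
            refine ⟨k, by simp; omega, hik, ?_⟩
            rw [List.take_append_of_le_length (by omega), List.getElem_append_left hk]
            exact hok
          · cases hlast : (pvChain h c).getLast? with
            | none => rw [hlast] at hnew; simp at hnew
            | some a =>
              rw [hlast] at hnew
              simp only [List.mem_singleton] at hnew
              subst hnew
              refine ⟨h.length, by simp, by exact hidx.symm, ?_⟩
              have htk : (h ++ [x]).take h.length = h := by simp
              have hge : (h ++ [x])[h.length]'(by simp) = x := by
                rw [List.getElem_append_right (Nat.le_refl _)]
                simp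
              rw [htk, hge]
              have hceq : c = x.1 - x.2 := (beq_iff_eq.mp hc).symm
              have hlq : pvLastQ h (pvDg x) = some a.2 := by
                rw [pvLastQ_eq_chain, show pvDg x = c from by simp [pvDg, hceq], hlast]
                rfl
              simp only [pvHitOK, hlq]
              simp only [] at hcond
              simp only [decide_eq_true_eq]
              exact hcond
        · rw [if_neg hc, List.append_nil] at hpr
          have hmem : i ∈ pvGood w A h := by
            rw [pvMemGood]; exact ⟨c, pr, hpr, hcond, hidx⟩
          rcases ih.mp hmem with ⟨k, hk, hik, hok⟩
          refine ⟨k, by simp; omega, hik, ?_⟩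
          rw [List.take_append_of_le_length (by omega), List.getElem_append_left hk]
          exact hok
      · rintro ⟨k, hk, hik, hok⟩
        simp only [List.length_append, List.length_cons, List.length_nil] at hk
        by_cases hkn : k < h.length
        · have hok' : pvHitOK w A (h.take k) (h[k]'hkn) = true := by
            rw [List.take_append_of_le_length (by omega), List.getElem_append_left hkn] at hok
            exact hok
          have hmem : i ∈ pvGood w A h := ih.mpr ⟨k, hkn, hik, hok'⟩
          rw [pvMemGood] at hmem
          rcases hmem with ⟨c, pr, hpr, hcond, hidx⟩
          refine ⟨c, pr, ?_, hcond, hidx⟩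
          rw [pvChain_snoc]
          by_cases hc : (x.1 - x.2) == c
          · rw [if_pos hc, pvZipTail_snoc]
            exact List.mem_append.mpr (Or.inl hpr)
          · rw [if_neg hc, List.append_nil]
            exact hpr
        · have hkeq : k = h.length := by omega
          subst hkeq
          have htk : (h ++ [x]).take h.length = h := by simp
          have hge : (h ++ [x])[h.length]'(by simp) = x := by
            rw [List.getElem_append_right (Nat.le_refl _)]
            simp
          rw [htk, hge] at hok
          simp only [pvHitOK] at hok
          cases hlq : pvLastQ h (pvDg x) with
          | none => rw [hlq] at hok; simp at hok
          | some last =>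
            rw [hlq] at hok
            rw [pvLastQ_eq_chain] at hlq
            cases hlast : (pvChain h (pvDg x)).getLast? with
            | none => rw [hlast] at hlq; simp at hlq
            | some a =>
              rw [hlast] at hlq
              simp only [Option.map_some, Option.some.injEq] at hlq
              refine ⟨pvDg x, (a, (((h.length : Nat) : Int), x.1)), ?_, ?_, by exact hik.symm⟩
              · rw [pvChain_snoc, if_pos (by simp [pvDg]), pvZipTail_snoc, hlast]
                exact List.mem_append.mpr (Or.inr (by simp))
              · simp only [decide_eq_true_eq] at hok
                simp only []
                rw [hlq]
                exact hok

theorem pvGoodContains (w A : Int) (h pre suf : List (Int × Int)) (x : Int × Int)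
    (hsplit : pre ++ x :: suf = h) :
    PySem.Set.contains (pvGood w A h) ((pre.length : Nat) : Int) = pvHitOK w A pre x := by
  have hlen : pre.length < h.length := by rw [← hsplit]; simp
  have htake : h.take pre.length = pre := by rw [← hsplit, List.take_left]
  have hget : h[pre.length]'hlen = x := by
    subst hsplit
    rw [List.getElem_append_right (Nat.le_refl _)]
    simp
  cases hOK : pvHitOK w A pre x with
  | true =>
      have hmem : ((pre.length : Nat) : Int) ∈ pvGood w A h := by
        rw [pvGood_char]
        refine ⟨pre.length, hlen, rfl, ?_⟩
        rw [htake, hget]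
        exact hOK
      exact (PySem.Set.contains_iff _ _).mpr hmem
  | false =>
      cases hcl : PySem.Set.contains (pvGood w A h) ((pre.length : Nat) : Int) with
      | false => rfl
      | true =>
        exfalso
        have hmem := (PySem.Set.contains_iff _ _).mp hcl
        rw [pvGood_char] at hmem
        rcases hmem with ⟨k, hk, hik, hok⟩
        have hkeq : k = pre.length := by exact_mod_cast hik.symm
        subst hkeq
        rw [htake, hget] at hok
        rw [hok] at hOK
        exact Bool.noConfusion hOK

theorem pvFinalPass (w A sid : Int) (h : List (Int × Int)) :
    ∀ (suf pre : List (Int × Int)) (acc : List (Int × Int × Int)), pre ++ suf = h →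
      (PySem.List.enumerate suf ((pre.length : Nat) : Int)).foldl
        (fun dh p => if PySem.Set.contains (pvGood w A h) p.1 then PySem.Set.add dh (sid, p.2.1, p.2.2) else dh) acc
      = pvEmit w A sid pre suf acc := by
  intro suf
  induction suf with
  | nil => intro pre acc _; rfl
  | cons x rest ih =>
      intro pre acc hsplit
      rw [PySem.List.enumerate_cons]
      simp only [List.foldl_cons]
      rw [pvGoodContains w A h pre rest x hsplit]
      have harg : ((pre.length : Nat) : Int) + 1 = (((pre ++ [x]).length : Nat) : Int) := by
        simp
      rw [harg]
      exact ih (pre ++ [x]) _ (by simpa using hsplit)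

theorem pvPerSeq (dico_mots : List (String × List Int)) (w A sid : Int) (seq : String)
    (acc : List (Int × Int × Int)) :
    ((PySem.List.pyRange 0 (PySem.Str.len seq - w + 1) 1).foldl (fun st pos_in_seq =>
        match (PySem.Dict.mk dico_mots).get? (PySem.Str.slice seq (some pos_in_seq) (some (pos_in_seq + w))) with
        | some qs => qs.foldl (fun st q => pvStepA w A sid st (q, pos_in_seq)) st
        | none => st) ((PySem.Dict.empty : PySem.Dict Int Int), acc)).2
    = (PySem.List.enumerate ((PySem.List.pyRange 0 (PySem.Str.len seq - w + 1) 1).flatMap (fun s =>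
          ((PySem.Dict.mk dico_mots).getD (PySem.Str.slice seq (some s) (some (s + w))) []).map
            (fun q => (q, s)))) 0).foldl
        (fun dh p =>
          if PySem.Set.contains (pvGood w A ((PySem.List.pyRange 0 (PySem.Str.len seq - w + 1) 1).flatMap (fun s =>
                ((PySem.Dict.mk dico_mots).getD (PySem.Str.slice seq (some s) (some (s + w))) []).map
                  (fun q => (q, s))))) p.1
          then PySem.Set.add dh (sid, p.2.1, p.2.2) else dh) acc := by
  have hflat : (PySem.List.pyRange 0 (PySem.Str.len seq - w + 1) 1).foldl (fun st pos_in_seq =>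
        match (PySem.Dict.mk dico_mots).get? (PySem.Str.slice seq (some pos_in_seq) (some (pos_in_seq + w))) with
        | some qs => qs.foldl (fun st q => pvStepA w A sid st (q, pos_in_seq)) st
        | none => st) ((PySem.Dict.empty : PySem.Dict Int Int), acc)
      = ((PySem.List.pyRange 0 (PySem.Str.len seq - w + 1) 1).flatMap (fun s =>
          ((PySem.Dict.mk dico_mots).getD (PySem.Str.slice seq (some s) (some (s + w))) []).map
            (fun q => (q, s)))).foldl (pvStepA w A sid) ((PySem.Dict.empty : PySem.Dict Int Int), acc) := by
    rw [pvFoldlFlatMap]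
    apply PySem.List.foldl_congr_mem
    intro st s _
    cases hg : (PySem.Dict.mk dico_mots).get? (PySem.Str.slice seq (some s) (some (s + w))) with
    | none =>
        simp only [hg, PySem.Dict.getD_eq_get?_getD]
        rfl
    | some qs =>
        simp only [hg, PySem.Dict.getD_eq_get?_getD, Option.getD_some]
        rw [List.foldl_map]
  rw [hflat]
  have hA := pvScanA w A sid
    ((PySem.List.pyRange 0 (PySem.Str.len seq - w + 1) 1).flatMap (fun s =>
        ((PySem.Dict.mk dico_mots).getD (PySem.Str.slice seq (some s) (some (s + w))) []).map
          (fun q => (q, s)))) [] PySem.Dict.empty acc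
    (fun c => by rw [PySem.Dict.get?_empty, pvLastQ_nil])
  have hB := pvFinalPass w A sid
    ((PySem.List.pyRange 0 (PySem.Str.len seq - w + 1) 1).flatMap (fun s =>
        ((PySem.Dict.mk dico_mots).getD (PySem.Str.slice seq (some s) (some (s + w))) []).map
          (fun q => (q, s))))
    ((PySem.List.pyRange 0 (PySem.Str.len seq - w + 1) 1).flatMap (fun s =>
        ((PySem.Dict.mk dico_mots).getD (PySem.Str.slice seq (some s) (some (s + w))) []).map
          (fun q => (q, s)))) [] acc rfl
  exact hA.trans hB.symm

-- ===== VERDICT (by name: the statement is the Claim_ definition above) =====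
theorem find_double_hits_spec : Claim_equal_find_double_hits := by
  intro dico_mots database w A _
  show find_double_hits dico_mots database w A = find_double_hits_alt dico_mots database w A
  unfold find_double_hits find_double_hits_alt
  apply PySem.List.foldl_congr_mem
  intro acc p _
  exact pvPerSeq dico_mots w A p.1 p.2 acc
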